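-- pv_equiv track=rewrite | github.com/Thijsvs/Opdrachten-SP | Formatieve opdracht 1a.py | opdracht3c
-- ===== SOURCE A (Python) =====
-- def opdracht3c(lst):
--     var0 = 0
--     var1 = 1
--     for x in lst:
--         if x == 1:
--             var1 += 1
--         elif x == 0:
--             var0 += 1
--         else:
--             return False
--
--     if var0 < var1 and var0 <= 12:
--         return True
--     else:
--         return False
-- ===== SOURCE B (Python) =====
-- def opdracht3c(lst):
--     # Sort; then a valid list is a block of 0s followed by a block of 1s.
--     s = sorted(lst)
--     if s and (s[0] < 0 or s[-1] > 1):
--         return False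
--     zeros = s.index(1) if 1 in s else len(s)
--     return zeros <= len(s) - zeros and zeros <= 12
-- ===== Notes on version B (the rewrite author's own statement) =====
-- stated objective: alternative
-- what changed: Instead of A's single accumulating loop with two counters and early exit, B sorts the list, validates by inspecting only the sorted endpoints (min/max in {0,1}), and reads the zero-count off as the position of the first 1 in the sorted list.
import Mathlib
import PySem

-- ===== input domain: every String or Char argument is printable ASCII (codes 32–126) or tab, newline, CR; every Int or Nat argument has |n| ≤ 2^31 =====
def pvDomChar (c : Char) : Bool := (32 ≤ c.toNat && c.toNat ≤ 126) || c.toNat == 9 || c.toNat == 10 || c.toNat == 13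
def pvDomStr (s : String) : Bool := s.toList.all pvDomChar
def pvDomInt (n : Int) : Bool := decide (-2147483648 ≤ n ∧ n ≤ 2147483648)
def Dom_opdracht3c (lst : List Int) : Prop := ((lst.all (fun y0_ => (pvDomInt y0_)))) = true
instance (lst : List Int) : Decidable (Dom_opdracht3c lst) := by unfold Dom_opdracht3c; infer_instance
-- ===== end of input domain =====

-- B sorts the list, validates via the sorted endpoints and reads the zero-count off as the
-- position of the first 1; objective: alternative (different algorithm, not claimed faster).

-- ===== PORT A =====
-- the for-loop with accumulators var0 (zeros) and var1 (starts at 1), early False on non-binary,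
-- then the final 'if var0 < var1 and var0 <= 12'
def opdracht3cLoop : List Int → Int → Int → Bool
  | [], var0, var1 => if var0 < var1 ∧ var0 ≤ 12 then true else false
  | x :: xs, var0, var1 =>
      if x = 1 then opdracht3cLoop xs var0 (var1 + 1)
      else if x = 0 then opdracht3cLoop xs (var0 + 1) var1
      else false

def opdracht3c (lst : List Int) : Bool := opdracht3cLoop lst 0 1

-- ===== PORT B =====
-- s = sorted(lst); 'if s and (s[0] < 0 or s[-1] > 1): return False';
-- under the guard s ≠ [], s[0] is s.headD 0 and s[-1] is s.getLastD 0 (exact there);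
-- zeros = s.index(1) if 1 in s else len(s) — index? is some under the membership guard,
-- so .getD 0 is exact.
def opdracht3c_alt (lst : List Int) : Bool :=
  let s := PySem.List.sorted lst (fun x => x) false
  if s ≠ [] ∧ (s.headD 0 < 0 ∨ s.getLastD 0 > 1) then false
  else
    let zeros : Nat := if (1 : Int) ∈ s then (PySem.List.index? s 1).getD 0 else s.length
    decide ((zeros : Int) ≤ (s.length : Int) - (zeros : Int) ∧ (zeros : Int) ≤ 12)

-- ===== PRECONDITION & SPEC =====
def Spec_opdracht3c (lst : List Int) (out : Bool) : Prop := out = opdracht3c_alt lst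
instance (lst : List Int) (out : Bool) : Decidable (Spec_opdracht3c lst out) := by unfold Spec_opdracht3c; infer_instance

-- ===== CLAIM (what is proved, stated in full; the proofs are below) =====
def Claim_equal_opdracht3c : Prop := ∀ (lst : List Int), Dom_opdracht3c lst → Spec_opdracht3c lst (opdracht3c lst)

-- ===== LEMMAS AND PROOFS =====

-- A's loop, closed form: false iff some non-binary element, else the counter test.
theorem opdracht3cLoop_eq (lst : List Int) : ∀ (v0 v1 : Int),
    opdracht3cLoop lst v0 v1 =
      if lst.any (fun x => x ≠ 0 ∧ x ≠ 1) then false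
      else decide (v0 + (lst.countP (fun x => x = 0) : Nat) < v1 + ((lst.length : Int) - (lst.countP (fun x => x = 0) : Nat))
                   ∧ v0 + (lst.countP (fun x => x = 0) : Nat) ≤ 12) := by
  induction lst with
  | nil =>
      intro v0 v1
      simp only [opdracht3cLoop, List.any_nil, List.countP_nil, List.length_nil, Bool.false_eq_true, if_false]
      split_ifs with h
      · simp; omega
      · simp; omega
  | cons x xs ih =>
      intro v0 v1
      by_cases hx1 : x = 1
      · subst hx1
        simp [opdracht3cLoop, ih]
        congr 2 <;> simp only [decide_eq_decide] <;> push_cast <;> omega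
      · by_cases hx0 : x = 0
        · subst hx0
          simp [opdracht3cLoop, ih]
          congr 2 <;> simp only [decide_eq_decide] <;> push_cast <;> omega
        · simp [opdracht3cLoop, hx0, hx1]

theorem headD_le_of_pairwise (s : List Int) (hs : s.Pairwise (· ≤ ·)) (x : Int) (hx : x ∈ s) :
    s.headD 0 ≤ x := by
  cases s with
  | nil => cases hx
  | cons a t =>
      rcases List.mem_cons.mp hx with h | h
      · simp [h]
      · exact (List.pairwise_cons.mp hs).1 x h

theorem le_getLastD_of_pairwise (s : List Int) (hs : s.Pairwise (· ≤ ·)) :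
    ∀ x ∈ s, x ≤ s.getLastD 0 := by
  induction s with
  | nil => simp
  | cons a t ih =>
      intro x hx
      rcases List.pairwise_cons.mp hs with ⟨ha, ht⟩
      cases t with
      | nil =>
          simp only [List.mem_singleton] at hx
          simp [hx]
      | cons b u =>
          rw [List.getLastD_eq_getLast?, List.getLast?_cons_cons, ← List.getLastD_eq_getLast?]
          rcases List.mem_cons.mp hx with h | h
          · exact (h ▸ ha b (by simp)).trans (ih ht b (by simp))
          · exact ih ht x h

theorem mem_headD_of_ne_nil (s : List Int) (h : s ≠ []) : s.headD 0 ∈ s := by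
  cases s with
  | nil => exact absurd rfl h
  | cons a t => simp

theorem mem_getLastD_of_ne_nil (s : List Int) : s ≠ [] → s.getLastD 0 ∈ s := by
  induction s with
  | nil => intro h; exact absurd rfl h
  | cons a t ih =>
      intro _
      cases t with
      | nil => simp
      | cons b u =>
          rw [List.getLastD_eq_getLast?, List.getLast?_cons_cons, ← List.getLastD_eq_getLast?]
          exact List.mem_cons_of_mem a (ih (by simp))

-- first index of 1 in a sorted binary list = number of zeros
theorem index_one_eq_countP (s : List Int) (hs : s.Pairwise (· ≤ ·))
    (hb : ∀ x ∈ s, x = 0 ∨ x = 1) :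
    (if (1 : Int) ∈ s then (PySem.List.index? s 1).getD 0 else s.length)
      = s.countP (fun x => x = 0) := by
  induction s with
  | nil => simp
  | cons a t ih =>
      rcases List.pairwise_cons.mp hs with ⟨ha, ht⟩
      have hbt : ∀ x ∈ t, x = 0 ∨ x = 1 := fun x hx => hb x (List.mem_cons_of_mem a hx)
      rcases hb a (by simp) with h0 | h1
      · subst h0
        have hne : (0 : Int) ≠ 1 := by decide
        by_cases h1t : (1 : Int) ∈ t
        · have : (1 : Int) ∈ (0 : Int) :: t := List.mem_cons_of_mem _ h1t
          rw [if_pos this, PySem.List.index?_cons_of_ne t hne]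
          have hsome : (PySem.List.index? t 1).isSome := (PySem.List.index?_isSome_iff (xs := t) (v := 1)).mpr h1t
          rcases Option.isSome_iff_exists.mp hsome with ⟨k, hk⟩
          rw [hk]
          have := ih ht hbt
          rw [if_pos h1t, hk] at this
          simp only [Option.map_some, Option.getD_some] at this ⊢
          simp [List.countP_cons, ← this]
        · have hnm : (1 : Int) ∉ (0 : Int) :: t := by
            simp [h1t]
          rw [if_neg hnm]
          have := ih ht hbt
          rw [if_neg h1t] at this
          simp [List.countP_cons, ← this]
  
      · subst h1
        -- head is 1: everything in t is ≥ 1 hence 1; no zeros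
        have h1m : (1 : Int) ∈ (1 : Int) :: t := by simp
        rw [if_pos h1m, PySem.List.index?_cons_self]
        have hz : t.countP (fun x : Int => x = 0) = 0 := by
          rw [List.countP_eq_zero]
          intro x hx
          rcases hbt x hx with h | h
          · exact absurd (h ▸ ha x hx) (by norm_num)
          · simp [h]
        simp [List.countP_cons, hz]

-- ===== VERDICT (by name: the statement is the Claim_ definition above) =====
theorem opdracht3c_spec : Claim_equal_opdracht3c := by
  intro lst _
  unfold Spec_opdracht3c opdracht3c opdracht3c_alt
  rw [opdracht3cLoop_eq]
  set s := PySem.List.sorted lst (fun x => x) false with hsdef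
  have hperm : s.Perm lst := PySem.List.sorted_perm lst (fun x => x) false
  have hpw : s.Pairwise (· ≤ ·) := PySem.List.sorted_pairwise lst (fun x => x)
  by_cases hbad : lst.any (fun x => x ≠ 0 ∧ x ≠ 1)
  · rw [if_pos hbad]
    rcases List.any_eq_true.mp hbad with ⟨x, hx, hxp⟩
    simp only [decide_eq_true_eq] at hxp
    have hxs : x ∈ s := hperm.mem_iff.mpr hx
    have hne : s ≠ [] := List.ne_nil_of_mem hxs
    have : s.headD 0 < 0 ∨ s.getLastD 0 > 1 := by
      rcases hxp with ⟨h0, h1⟩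
      by_cases hlt : x < 0
      · exact Or.inl (lt_of_le_of_lt (headD_le_of_pairwise s hpw x hxs) hlt)
      · have : 1 < x := by omega
        exact Or.inr (lt_of_lt_of_le this (le_getLastD_of_pairwise s hpw x hxs))
    rw [if_pos ⟨hne, this⟩]
  · rw [if_neg hbad]
    have hball : ∀ x ∈ lst, x = 0 ∨ x = 1 := by
      intro x hx
      by_contra hc
      rw [not_or] at hc
      exact hbad (List.any_eq_true.mpr ⟨x, hx, by simp [hc.1, hc.2]⟩)
    have hbs : ∀ x ∈ s, x = 0 ∨ x = 1 := fun x hx => hball x (hperm.mem_iff.mp hx)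
    -- guard is false
    have hguard : ¬ (s ≠ [] ∧ (s.headD 0 < 0 ∨ s.getLastD 0 > 1)) := by
      rintro ⟨hne, h | h⟩
      · rcases hbs _ (mem_headD_of_ne_nil s hne) with h0 | h0 <;> rw [h0] at h <;> norm_num at h
      · rcases hbs _ (mem_getLastD_of_ne_nil s hne) with h0 | h0 <;> rw [h0] at h <;> norm_num at h
    rw [if_neg hguard]
    have hidx := index_one_eq_countP s hpw hbs
    simp only [hidx]
    have hcnt : s.countP (fun x => x = 0) = lst.countP (fun x => x = 0) := hperm.countP_eq _
    have hlen : s.length = lst.length := hperm.length_eq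
    rw [hcnt, hlen]
    have hle : lst.countP (fun x => x = 0) ≤ lst.length := List.countP_le_length
    simp only [decide_eq_decide]
    constructor <;> intro ⟨h1, h2⟩ <;> push_cast at * <;> omega
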